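-- pv_equiv track=rewrite | github.com/brad-young/test | flight_parser.py | aggregate_flight_data
-- ===== SOURCE A (Python) =====
-- def aggregate_flight_data(state_specific_flights): # Parameter name changed for clarity
--     """Aggregates flight data by destination and status."""
--     aggregated_data = {}
--     for flight in state_specific_flights: # Use new parameter name
--         destination = flight['destination']
--         status = flight['status']
--         if destination not in aggregated_data:
--             aggregated_data[destination] = {}
--         aggregated_data[destination][status] = aggregated_data[destination].get(status, 0) + 1
--     return aggregated_data
-- ===== SOURCE B (Python) =====
-- def aggregate_flight_data(state_specific_flights):
--     """Aggregates flight data by destination and status (two-pass: flat pair counter, then assemble)."""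
--     counts = {}
--     for flight in state_specific_flights:
--         key = (flight['destination'], flight['status'])
--         counts[key] = counts.get(key, 0) + 1
--     result = {}
--     for (destination, status), n in counts.items():
--         if destination not in result:
--             result[destination] = {}
--         result[destination][status] = n
--     return result
-- ===== Notes on version B (the rewrite author's own statement) =====
-- stated objective: alternative
-- what changed: A builds the nested dict incrementally per flight; B makes two passes: a flat counter keyed by the (destination, status) pair, then assembles the nested plain dict from the counter's items in first-seen order.
import Mathlib
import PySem

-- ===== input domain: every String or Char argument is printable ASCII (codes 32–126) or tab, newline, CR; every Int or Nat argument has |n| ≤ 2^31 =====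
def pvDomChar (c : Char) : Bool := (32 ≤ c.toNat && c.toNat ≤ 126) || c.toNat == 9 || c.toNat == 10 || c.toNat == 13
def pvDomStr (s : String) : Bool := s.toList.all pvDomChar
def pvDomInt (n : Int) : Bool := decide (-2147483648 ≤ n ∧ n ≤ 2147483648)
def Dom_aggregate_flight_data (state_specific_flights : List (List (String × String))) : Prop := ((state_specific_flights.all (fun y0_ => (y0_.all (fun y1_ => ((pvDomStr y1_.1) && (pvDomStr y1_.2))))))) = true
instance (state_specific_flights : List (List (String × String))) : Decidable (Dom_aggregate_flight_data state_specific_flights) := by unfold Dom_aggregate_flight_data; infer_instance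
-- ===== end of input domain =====

-- B replaces A's incremental nested-dict build by two passes (a flat (destination, status) pair
-- counter, then assembly of the nested dict from the counter's items); alternative decomposition, same cost.


-- ===== PORT A =====
-- one loop iteration of A: ensure agg[destination] exists, then bump agg[destination][status]
def aggStepA (aggregated_data : PySem.Dict String (PySem.Dict String Int))
    (flight : List (String × String)) : PySem.Dict String (PySem.Dict String Int) :=
  let destination := (PySem.Dict.mk flight).getD "destination" ""   -- flight['destination'] (Pre_ guarantees the key)
  let status := (PySem.Dict.mk flight).getD "status" ""             -- flight['status']
  let agg1 := if aggregated_data.contains destination then aggregated_data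
              else aggregated_data.insert destination PySem.Dict.empty
  let inner := agg1.getD destination PySem.Dict.empty
  agg1.insert destination (inner.insert status (inner.getD status 0 + 1))

def aggregate_flight_data (state_specific_flights : List (List (String × String))) : List (String × List (String × Int)) :=
  ((state_specific_flights.foldl aggStepA PySem.Dict.empty).items.map (fun p => (p.1, p.2.items)))

-- ===== PORT B =====
-- first pass of B: count occurrences of each (destination, status) pair
def cntStepB (counts : PySem.Dict (String × String) Int)
    (flight : List (String × String)) : PySem.Dict (String × String) Int :=
  let key := ((PySem.Dict.mk flight).getD "destination" "", (PySem.Dict.mk flight).getD "status" "")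
  counts.insert key (counts.getD key 0 + 1)

-- second pass of B: create result[destination] on first sight, set result[destination][status] = n
def asmStepB (result : PySem.Dict String (PySem.Dict String Int))
    (it : (String × String) × Int) : PySem.Dict String (PySem.Dict String Int) :=
  let destination := it.1.1
  let status := it.1.2
  let res1 := if result.contains destination then result
              else result.insert destination PySem.Dict.empty
  res1.insert destination ((res1.getD destination PySem.Dict.empty).insert status it.2)

def aggregate_flight_data_alt (state_specific_flights : List (List (String × String))) : List (String × List (String × Int)) :=
  let counts := state_specific_flights.foldl cntStepB PySem.Dict.empty
  ((counts.items.foldl asmStepB PySem.Dict.empty).items.map (fun p => (p.1, p.2.items)))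

-- ===== PRECONDITION & SPEC =====
-- Pre_ excludes exactly the inputs where Python A raises KeyError: a flight without a 'destination' or 'status' key.
def Pre_aggregate_flight_data (state_specific_flights : List (List (String × String))) : Prop :=
  ∀ flight ∈ state_specific_flights,
    "destination" ∈ flight.map Prod.fst ∧ "status" ∈ flight.map Prod.fst
instance (state_specific_flights : List (List (String × String))) : Decidable (Pre_aggregate_flight_data state_specific_flights) := by unfold Pre_aggregate_flight_data; infer_instance

def pvWitness_aggregate_flight_data : (List (List (String × String))) :=
  ([[("destination", "JFK"), ("status", "on time")],
    [("destination", "JFK"), ("status", "delayed")],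
    [("destination", "LAX"), ("status", "on time")],
    [("destination", "JFK"), ("status", "on time")]])

def Spec_aggregate_flight_data (state_specific_flights : List (List (String × String))) (out : List (String × List (String × Int))) : Prop := out = aggregate_flight_data_alt state_specific_flights
instance (state_specific_flights : List (List (String × String))) (out : List (String × List (String × Int))) : Decidable (Spec_aggregate_flight_data state_specific_flights out) := by unfold Spec_aggregate_flight_data; infer_instance

-- ===== CLAIM (what is proved, stated in full; the proofs are below) =====
def Claim_equal_aggregate_flight_data : Prop := ∀ (state_specific_flights : List (List (String × String))), Dom_aggregate_flight_data state_specific_flights → Pre_aggregate_flight_data state_specific_flights → Spec_aggregate_flight_data state_specific_flights (aggregate_flight_data state_specific_flights)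

-- ===== LEMMAS AND PROOFS =====

-- the (destination, status) key both programs extract from a flight
def keyOf (flight : List (String × String)) : String × String :=
  ((PySem.Dict.mk flight).getD "destination" "", (PySem.Dict.mk flight).getD "status" "")

-- closed form of the nested aggregate of a list of (destination, status) pairs:
-- destinations in first-seen order; for each, its statuses in first-seen pair order with pair counts
def innerSpec (ps : List (String × String)) (d : String) : PySem.Dict String Int :=
  PySem.Dict.mk (((PySem.Set.ofList ps).filter (fun p => p.1 == d)).map (fun p => (p.2, (ps.count p : Int))))

def specD (ps : List (String × String)) : PySem.Dict String (PySem.Dict String Int) :=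
  PySem.Dict.mk ((PySem.Set.ofList (ps.map Prod.fst)).map (fun d => (d, innerSpec ps d)))


-- ---- facts about specD ----
theorem keys_specD (ps : List (String × String)) :
    (specD ps).keys = PySem.Set.ofList (ps.map Prod.fst) := by
  simp [specD, PySem.Dict.keys_mk, List.map_map, Function.comp_def]

theorem nodup_keys_specD (ps : List (String × String)) : (specD ps).keys.Nodup := by
  rw [keys_specD]; exact PySem.Set.nodup_ofList _

theorem getD_specD {ps : List (String × String)} {d : String} (h : d ∈ ps.map Prod.fst) :
    (specD ps).getD d PySem.Dict.empty = innerSpec ps d := by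
  apply PySem.Dict.getD_of_mem_items _ _ (nodup_keys_specD ps)
  show (d, innerSpec ps d) ∈ ((PySem.Set.ofList (ps.map Prod.fst)).map (fun d => (d, innerSpec ps d)))
  exact List.mem_map_of_mem ((PySem.Set.mem_ofList _ _).mpr h)

theorem contains_specD (ps : List (String × String)) (d : String) :
    (specD ps).contains d = decide (d ∈ ps.map Prod.fst) := by
  rw [PySem.Dict.contains_eq_decide_mem_keys, keys_specD]
  simp [PySem.Set.mem_ofList]

-- ---- facts about innerSpec ----
theorem keys_innerSpec (ps : List (String × String)) (d : String) :
    (innerSpec ps d).keys = ((PySem.Set.ofList ps).filter (fun p => p.1 == d)).map Prod.snd := by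
  simp [innerSpec, PySem.Dict.keys_mk, List.map_map, Function.comp]

theorem mem_keys_innerSpec (ps : List (String × String)) (d s : String) :
    s ∈ (innerSpec ps d).keys ↔ (d, s) ∈ ps := by
  rw [keys_innerSpec]
  simp only [List.mem_map, List.mem_filter, PySem.Set.mem_ofList, beq_iff_eq]
  constructor
  · rintro ⟨p, ⟨hp, h1⟩, h2⟩
    have : p = (d, s) := by cases p; simp_all
    exact this ▸ hp
  · intro h; exact ⟨(d, s), ⟨h, rfl⟩, rfl⟩

theorem nodup_keys_innerSpec (ps : List (String × String)) (d : String) :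
    (innerSpec ps d).keys.Nodup := by
  rw [keys_innerSpec]
  apply List.Nodup.map_on
  · intro p hp q hq h2
    have h1p := (List.mem_filter.mp hp).2
    have h1q := (List.mem_filter.mp hq).2
    cases p; cases q; simp_all
  · exact (PySem.Set.nodup_ofList ps).filter _

theorem getD_innerSpec {ps : List (String × String)} {d s : String} (h : (d, s) ∈ ps) :
    (innerSpec ps d).getD s 0 = (ps.count (d, s) : Int) := by
  apply PySem.Dict.getD_of_mem_items _ _ (nodup_keys_innerSpec ps d)
  show (s, (ps.count (d, s) : Int)) ∈ (((PySem.Set.ofList ps).filter (fun p => p.1 == d)).map (fun p => (p.2, (ps.count p : Int))))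
  exact List.mem_map_of_mem (List.mem_filter.mpr ⟨(PySem.Set.mem_ofList _ _).mpr h, by simp⟩)

theorem getD_innerSpec_zero {ps : List (String × String)} {d s : String} (h : (d, s) ∉ ps) :
    (innerSpec ps d).getD s 0 = 0 := by
  apply PySem.Dict.getD_of_not_contains
  have : s ∉ (innerSpec ps d).keys := fun hm => h ((mem_keys_innerSpec ps d s).mp hm)
  revert this
  rw [← PySem.Dict.contains_iff_mem_keys]
  cases hc : (innerSpec ps d).contains s <;> simp

-- ---- how appending one pair changes innerSpec ----
theorem innerSpec_append_ne (ps : List (String × String)) (d s d' : String) (hne : d' ≠ d) :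
    innerSpec (ps ++ [(d, s)]) d' = innerSpec ps d' := by
  unfold innerSpec
  have hcount : ∀ p ∈ (PySem.Set.ofList ps).filter (fun p => p.1 == d'), ((ps ++ [(d, s)]).count p : Int) = (ps.count p : Int) := by
    intro p hp
    have h1 := (List.mem_filter.mp hp).2
    have hpne : p ≠ (d, s) := by
      intro he; subst he; simp only [beq_iff_eq] at h1; exact hne h1.symm
    simp [List.count_append, Ne.symm hpne]
  rw [PySem.Set.ofList_append_singleton]
  by_cases hmem : (d, s) ∈ PySem.Set.ofList ps
  · rw [PySem.Set.add_of_mem hmem]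
    exact congrArg PySem.Dict.mk (List.map_congr_left (fun p hp => by rw [hcount p hp]))
  · rw [PySem.Set.add_of_not_mem hmem, List.filter_append]
    have : List.filter (fun p => p.1 == d') [(d, s)] = [] := by simp [hne.symm]
    rw [this, List.append_nil]
    exact congrArg PySem.Dict.mk (List.map_congr_left (fun p hp => by rw [hcount p hp]))

theorem innerSpec_append_self_mem {ps : List (String × String)} {d s : String} (h : (d, s) ∈ ps) :
    innerSpec (ps ++ [(d, s)]) d = (innerSpec ps d).insert s ((ps.count (d, s) : Int) + 1) := by
  apply PySem.Dict.ext
  have hcont : (innerSpec ps d).contains s = true := by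
    rw [PySem.Dict.contains_iff_mem_keys]; exact (mem_keys_innerSpec ps d s).mpr h
  rw [PySem.Dict.items_insert_of_contains _ _ hcont]
  show ((PySem.Set.ofList (ps ++ [(d, s)])).filter (fun p => p.1 == d)).map (fun p => (p.2, ((ps ++ [(d, s)]).count p : Int)))
      = List.map (fun q => if q.1 == s then (s, (ps.count (d, s) : Int) + 1) else q)
          (((PySem.Set.ofList ps).filter (fun p => p.1 == d)).map (fun p => (p.2, (ps.count p : Int))))
  rw [PySem.Set.ofList_append_singleton, PySem.Set.add_of_mem ((PySem.Set.mem_ofList _ _).mpr h), List.map_map]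
  apply List.map_congr_left
  intro p hp
  have h1 := (List.mem_filter.mp hp).2
  by_cases hps : p = (d, s)
  · subst hps
    simp [List.count_append]
  · have h2 : p.2 ≠ s := by cases p; simp_all
    simp [List.count_append, Ne.symm hps, Function.comp, h2]

theorem innerSpec_append_self_not_mem {ps : List (String × String)} {d s : String} (h : (d, s) ∉ ps) :
    innerSpec (ps ++ [(d, s)]) d = PySem.Dict.mk ((innerSpec ps d).items ++ [(s, 1)]) := by
  apply PySem.Dict.ext
  show ((PySem.Set.ofList (ps ++ [(d, s)])).filter (fun p => p.1 == d)).map (fun p => (p.2, ((ps ++ [(d, s)]).count p : Int)))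
      = ((PySem.Set.ofList ps).filter (fun p => p.1 == d)).map (fun p => (p.2, (ps.count p : Int))) ++ [(s, 1)]
  rw [PySem.Set.ofList_append_singleton, PySem.Set.add_of_not_mem (fun hm => h ((PySem.Set.mem_ofList _ _).mp hm)),
      List.filter_append, List.map_append]
  congr 1
  · apply List.map_congr_left
    intro p hp
    have hmem : p ∈ ps := (PySem.Set.mem_ofList _ _).mp (List.mem_filter.mp hp).1
    have hpne : p ≠ (d, s) := fun he => h (he ▸ hmem)
    simp [List.count_append, Ne.symm hpne]
  · have hc0 : ps.count (d, s) = 0 := List.count_eq_zero.mpr h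
    simp [List.count_append, hc0]

-- ---- one A-loop step on the closed form ----
theorem contains_innerSpec_false {ps : List (String × String)} {d s : String} (h : (d, s) ∉ ps) :
    (innerSpec ps d).contains s = false := by
  cases hc : (innerSpec ps d).contains s
  · rfl
  · exact absurd ((mem_keys_innerSpec ps d s).mp ((PySem.Dict.contains_iff_mem_keys _ _).mp hc)) h

theorem dests_append_mem {ps : List (String × String)} {d : String} (s : String) (hd : d ∈ ps.map Prod.fst) :
    PySem.Set.ofList (List.map Prod.fst (ps ++ [(d, s)])) = PySem.Set.ofList (ps.map Prod.fst) := by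
  rw [List.map_append, show List.map Prod.fst [(d, s)] = [d] from rfl, PySem.Set.ofList_append_singleton]
  exact PySem.Set.add_of_mem ((PySem.Set.mem_ofList _ _).mpr hd)

theorem stepA_gen (ps : List (String × String)) (d s : String) :
    (let agg1 := if (specD ps).contains d then specD ps else (specD ps).insert d PySem.Dict.empty
     let inner := agg1.getD d PySem.Dict.empty
     agg1.insert d (inner.insert s (inner.getD s 0 + 1))) = specD (ps ++ [(d, s)]) := by
  by_cases hd : d ∈ ps.map Prod.fst
  · have hcont : (specD ps).contains d = true := by
      rw [contains_specD]; exact decide_eq_true hd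
    simp only [hcont, if_true]
    rw [getD_specD hd]
    by_cases hds : (d, s) ∈ ps
    · rw [getD_innerSpec hds]
      apply PySem.Dict.ext
      rw [PySem.Dict.items_insert_of_contains _ _ hcont]
      show List.map (fun p => if p.1 == d then (d, (innerSpec ps d).insert s ((ps.count (d, s) : Int) + 1)) else p)
            (List.map (fun d' => (d', innerSpec ps d')) (PySem.Set.ofList (ps.map Prod.fst)))
          = List.map (fun d' => (d', innerSpec (ps ++ [(d, s)]) d')) (PySem.Set.ofList (List.map Prod.fst (ps ++ [(d, s)])))
      rw [dests_append_mem s hd, List.map_map]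
      apply List.map_congr_left
      intro d' _
      by_cases hdd : d' = d
      · subst hdd
        simp only [Function.comp_apply, beq_self_eq_true, if_true]
        rw [innerSpec_append_self_mem hds]
      · simp only [Function.comp_apply]
        rw [innerSpec_append_ne ps d s d' hdd]
        simp [hdd]
    · rw [getD_innerSpec_zero hds]
      have hins : (innerSpec ps d).insert s (0 + 1) = innerSpec (ps ++ [(d, s)]) d := by
        rw [innerSpec_append_self_not_mem hds]
        apply PySem.Dict.ext
        rw [PySem.Dict.items_insert_of_not_contains _ _ (contains_innerSpec_false hds)]
        norm_num
      apply PySem.Dict.ext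
      rw [PySem.Dict.items_insert_of_contains _ _ hcont]
      show List.map (fun p => if p.1 == d then (d, (innerSpec ps d).insert s (0 + 1)) else p)
            (List.map (fun d' => (d', innerSpec ps d')) (PySem.Set.ofList (ps.map Prod.fst)))
          = List.map (fun d' => (d', innerSpec (ps ++ [(d, s)]) d')) (PySem.Set.ofList (List.map Prod.fst (ps ++ [(d, s)])))
      rw [dests_append_mem s hd, List.map_map]
      apply List.map_congr_left
      intro d' _
      by_cases hdd : d' = d
      · subst hdd
        simp only [Function.comp_apply, beq_self_eq_true, if_true]
        rw [hins]
      · simp only [Function.comp_apply]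
        rw [innerSpec_append_ne ps d s d' hdd]
        simp [hdd]
  · have hcont : (specD ps).contains d = false := by
      rw [contains_specD]; exact decide_eq_false hd
    have hds : (d, s) ∉ ps := fun hm => hd (List.mem_map_of_mem hm)
    simp only [hcont, Bool.false_eq_true, if_false]
    rw [PySem.Dict.getD_insert_self, PySem.Dict.getD_empty, PySem.Dict.insert_insert_self]
    have hfil : List.filter (fun p => p.1 == d) (PySem.Set.ofList ps) = [] := by
      apply List.filter_eq_nil_iff.mpr
      intro p hp
      have : p ∈ ps := (PySem.Set.mem_ofList _ _).mp hp
      have : p.1 ∈ ps.map Prod.fst := List.mem_map_of_mem this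
      simp only [beq_iff_eq]
      intro he; exact hd (he ▸ this)
    have hins : PySem.Dict.empty.insert s (0 + 1) = innerSpec (ps ++ [(d, s)]) d := by
      rw [innerSpec_append_self_not_mem hds]
      apply PySem.Dict.ext
      rw [PySem.Dict.items_insert_of_not_contains _ _ (PySem.Dict.contains_empty s)]
      show [] ++ [(s, (0 : Int) + 1)] = (innerSpec ps d).items ++ [(s, 1)]
      have : (innerSpec ps d).items = [] := by
        show ((PySem.Set.ofList ps).filter (fun p => p.1 == d)).map (fun p => (p.2, (ps.count p : Int))) = []
        rw [hfil]; rfl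
      rw [this]; norm_num
    apply PySem.Dict.ext
    rw [PySem.Dict.items_insert_of_not_contains _ _ hcont]
    show List.map (fun d' => (d', innerSpec ps d')) (PySem.Set.ofList (ps.map Prod.fst)) ++ [(d, PySem.Dict.empty.insert s (0 + 1))]
        = List.map (fun d' => (d', innerSpec (ps ++ [(d, s)]) d')) (PySem.Set.ofList (List.map Prod.fst (ps ++ [(d, s)])))
    have hdest : PySem.Set.ofList (List.map Prod.fst (ps ++ [(d, s)])) = PySem.Set.ofList (ps.map Prod.fst) ++ [d] := by
      rw [List.map_append, show List.map Prod.fst [(d, s)] = [d] from rfl, PySem.Set.ofList_append_singleton]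
      exact PySem.Set.add_of_not_mem (fun hm => hd ((PySem.Set.mem_ofList _ _).mp hm))
    rw [hdest, List.map_append]
    congr 1
    · apply List.map_congr_left
      intro d' hd'
      have hdd : d' ≠ d := by
        intro he; subst he
        exact hd ((PySem.Set.mem_ofList _ _).mp hd')
      rw [innerSpec_append_ne ps d s d' hdd]
    · show [(d, PySem.Dict.empty.insert s (0 + 1))] = [(d, innerSpec (ps ++ [(d, s)]) d)]
      rw [hins]

theorem foldA_eq_specD (fs : List (List (String × String))) :
    fs.foldl aggStepA PySem.Dict.empty = specD (fs.map keyOf) := by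
  induction fs using List.reverseRecOn with
  | nil => rfl
  | append_singleton fs f ih =>
    rw [List.foldl_append, List.map_append, List.foldl_cons, List.foldl_nil]
    rw [ih]
    exact stepA_gen (fs.map keyOf) (keyOf f).1 (keyOf f).2

-- ---- B side: closed form of the assembly fold over a list of ((d,s),n) items ----
def innerSpecL (L : List ((String × String) × Int)) (d : String) : PySem.Dict String Int :=
  PySem.Dict.mk ((L.filter (fun x => x.1.1 == d)).map (fun x => (x.1.2, x.2)))

def specL (L : List ((String × String) × Int)) : PySem.Dict String (PySem.Dict String Int) :=
  PySem.Dict.mk ((PySem.Set.ofList (L.map (fun x => x.1.1))).map (fun d => (d, innerSpecL L d)))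

theorem keys_specL (L : List ((String × String) × Int)) :
    (specL L).keys = PySem.Set.ofList (L.map (fun x => x.1.1)) := by
  simp [specL, PySem.Dict.keys_mk, List.map_map, Function.comp_def]

theorem nodup_keys_specL (L : List ((String × String) × Int)) : (specL L).keys.Nodup := by
  rw [keys_specL]; exact PySem.Set.nodup_ofList _

theorem getD_specL {L : List ((String × String) × Int)} {d : String} (h : d ∈ L.map (fun x => x.1.1)) :
    (specL L).getD d PySem.Dict.empty = innerSpecL L d := by
  apply PySem.Dict.getD_of_mem_items _ _ (nodup_keys_specL L)
  show (d, innerSpecL L d) ∈ ((PySem.Set.ofList (L.map (fun x => x.1.1))).map (fun d => (d, innerSpecL L d)))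
  exact List.mem_map_of_mem ((PySem.Set.mem_ofList _ _).mpr h)

theorem contains_specL (L : List ((String × String) × Int)) (d : String) :
    (specL L).contains d = decide (d ∈ L.map (fun x => x.1.1)) := by
  rw [PySem.Dict.contains_eq_decide_mem_keys, keys_specL]
  simp [PySem.Set.mem_ofList]

theorem keys_innerSpecL (L : List ((String × String) × Int)) (d : String) :
    (innerSpecL L d).keys = (L.filter (fun x => x.1.1 == d)).map (fun x => x.1.2) := by
  simp [innerSpecL, PySem.Dict.keys_mk, List.map_map, Function.comp_def]

theorem contains_innerSpecL_false {L : List ((String × String) × Int)} {d s : String}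
    (h : (d, s) ∉ L.map Prod.fst) : (innerSpecL L d).contains s = false := by
  cases hc : (innerSpecL L d).contains s
  · rfl
  · exfalso
    have hm := (PySem.Dict.contains_iff_mem_keys _ _).mp hc
    rw [keys_innerSpecL] at hm
    obtain ⟨x, hx, hx2⟩ := List.mem_map.mp hm
    have hx1 := (List.mem_filter.mp hx).2
    apply h
    have : x.1 = (d, s) := by
      cases hx1' : x.1
      rw [hx1'] at hx1 hx2
      simp_all
    exact this ▸ List.mem_map_of_mem (List.mem_filter.mp hx).1
  
theorem innerSpecL_append_ne (L : List ((String × String) × Int)) (d s : String) (n : Int)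
    (d' : String) (hne : d' ≠ d) : innerSpecL (L ++ [((d, s), n)]) d' = innerSpecL L d' := by
  unfold innerSpecL
  rw [List.filter_append]
  have : List.filter (fun x => x.1.1 == d') [((d, s), n)] = [] := by simp [Ne.symm hne]
  rw [this, List.append_nil]

theorem innerSpecL_append_self (L : List ((String × String) × Int)) (d s : String) (n : Int) :
    innerSpecL (L ++ [((d, s), n)]) d = PySem.Dict.mk ((innerSpecL L d).items ++ [(s, n)]) := by
  apply PySem.Dict.ext
  show ((L ++ [((d, s), n)]).filter (fun x => x.1.1 == d)).map (fun x => (x.1.2, x.2))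
      = (L.filter (fun x => x.1.1 == d)).map (fun x => (x.1.2, x.2)) ++ [(s, n)]
  rw [List.filter_append]
  have : List.filter (fun x => x.1.1 == d) [((d, s), n)] = [((d, s), n)] := by simp
  rw [this, List.map_append]
  rfl

theorem dests_L_append (L : List ((String × String) × Int)) (d s : String) (n : Int) :
    PySem.Set.ofList ((L ++ [((d, s), n)]).map (fun x => x.1.1))
      = (PySem.Set.ofList (L.map (fun x => x.1.1))).add d := by
  rw [List.map_append, show List.map (fun x => x.1.1) [((d, s), n)] = [d] from rfl,
      PySem.Set.ofList_append_singleton]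

theorem foldl_asm_eq_specL (L : List ((String × String) × Int)) (h : (L.map Prod.fst).Nodup) :
    L.foldl asmStepB PySem.Dict.empty = specL L := by
  induction L using List.reverseRecOn with
  | nil => rfl
  | append_singleton L x ih =>
    rw [List.map_append, List.nodup_append] at h
    obtain ⟨h1, _, h2⟩ := h
    have hfresh : x.1 ∉ L.map Prod.fst := by
      intro hm
      exact (h2 x.1 hm x.1 (by simp)) rfl
    rw [List.foldl_append, List.foldl_cons, List.foldl_nil, ih h1]
    obtain ⟨⟨d, s⟩, n⟩ := x
    show (let res1 := if (specL L).contains d then specL L else (specL L).insert d PySem.Dict.empty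
          res1.insert d ((res1.getD d PySem.Dict.empty).insert s n)) = specL (L ++ [((d, s), n)])
    by_cases hd : d ∈ L.map (fun x => x.1.1)
    · have hcont : (specL L).contains d = true := by
        rw [contains_specL]; exact decide_eq_true hd
      simp only [hcont, if_true]
      rw [getD_specL hd]
      have hins : (innerSpecL L d).insert s n = innerSpecL (L ++ [((d, s), n)]) d := by
        rw [innerSpecL_append_self]
        apply PySem.Dict.ext
        rw [PySem.Dict.items_insert_of_not_contains _ _ (contains_innerSpecL_false hfresh)]
      apply PySem.Dict.ext
      rw [PySem.Dict.items_insert_of_contains _ _ hcont]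
      show List.map (fun p => if p.1 == d then (d, (innerSpecL L d).insert s n) else p)
            (List.map (fun d' => (d', innerSpecL L d')) (PySem.Set.ofList (L.map (fun x => x.1.1))))
          = List.map (fun d' => (d', innerSpecL (L ++ [((d, s), n)]) d'))
              (PySem.Set.ofList ((L ++ [((d, s), n)]).map (fun x => x.1.1)))
      rw [dests_L_append, PySem.Set.add_of_mem ((PySem.Set.mem_ofList _ _).mpr hd), List.map_map]
      apply List.map_congr_left
      intro d' _
      by_cases hdd : d' = d
      · subst hdd
        simp only [Function.comp_apply, beq_self_eq_true, if_true]
        rw [hins]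
      · simp only [Function.comp_apply]
        rw [innerSpecL_append_ne L d s n d' hdd]
        simp [hdd]
    · have hcont : (specL L).contains d = false := by
        rw [contains_specL]; exact decide_eq_false hd
      simp only [hcont, Bool.false_eq_true, if_false]
      rw [PySem.Dict.getD_insert_self, PySem.Dict.insert_insert_self]
      have hfil : List.filter (fun x => x.1.1 == d) L = [] := by
        apply List.filter_eq_nil_iff.mpr
        intro x hx
        simp only [beq_iff_eq]
        intro he
        exact hd (he ▸ List.mem_map_of_mem hx)
      have hins : PySem.Dict.empty.insert s n = innerSpecL (L ++ [((d, s), n)]) d := by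
        rw [innerSpecL_append_self]
        apply PySem.Dict.ext
        rw [PySem.Dict.items_insert_of_not_contains _ _ (PySem.Dict.contains_empty s)]
        show [] ++ [(s, n)] = (innerSpecL L d).items ++ [(s, n)]
        have : (innerSpecL L d).items = [] := by
          show (L.filter (fun x => x.1.1 == d)).map (fun x => (x.1.2, x.2)) = []
          rw [hfil]; rfl
        rw [this]
      apply PySem.Dict.ext
      rw [PySem.Dict.items_insert_of_not_contains _ _ hcont]
      show List.map (fun d' => (d', innerSpecL L d')) (PySem.Set.ofList (L.map (fun x => x.1.1)))
            ++ [(d, PySem.Dict.empty.insert s n)]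
          = List.map (fun d' => (d', innerSpecL (L ++ [((d, s), n)]) d'))
              (PySem.Set.ofList ((L ++ [((d, s), n)]).map (fun x => x.1.1)))
      rw [dests_L_append, PySem.Set.add_of_not_mem (fun hm => hd ((PySem.Set.mem_ofList _ _).mp hm)),
          List.map_append]
      congr 1
      · apply List.map_congr_left
        intro d' hd'
        have hdd : d' ≠ d := fun he => hd (he ▸ (PySem.Set.mem_ofList _ _).mp hd')
        rw [innerSpecL_append_ne L d s n d' hdd]
      · show [(d, PySem.Dict.empty.insert s n)] = [(d, innerSpecL (L ++ [((d, s), n)]) d)]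
        rw [hins]

theorem ofList_map_ofList {α β : Type} [BEq α] [LawfulBEq α] [BEq β] [LawfulBEq β] (l : List α) (f : α → β) :
    PySem.Set.ofList ((PySem.Set.ofList l).map f) = PySem.Set.ofList (l.map f) := by
  induction l using List.reverseRecOn with
  | nil => rfl
  | append_singleton l x ih =>
    rw [PySem.Set.ofList_append_singleton, List.map_append,
        show List.map f [x] = [f x] from rfl, PySem.Set.ofList_append_singleton]
    by_cases hx : x ∈ PySem.Set.ofList l
    · rw [PySem.Set.add_of_mem hx, ih, PySem.Set.add_of_mem]
      rw [PySem.Set.mem_ofList]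
      exact List.mem_map_of_mem ((PySem.Set.mem_ofList _ _).mp hx)
    · rw [PySem.Set.add_of_not_mem hx, List.map_append, show List.map f [x] = [f x] from rfl,
          PySem.Set.ofList_append_singleton, ih]

theorem innerSpecL_counter_items (ps : List (String × String)) (d : String) :
    innerSpecL ((PySem.Set.ofList ps).map (fun k => (k, (ps.count k : Int)))) d = innerSpec ps d := by
  simp [innerSpecL, innerSpec, List.filter_map, List.map_map, Function.comp_def]

theorem foldB_eq_specD (fs : List (List (String × String))) :
    ((fs.foldl cntStepB PySem.Dict.empty).items.foldl asmStepB PySem.Dict.empty) = specD (fs.map keyOf) := by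
  have h1 : fs.foldl cntStepB PySem.Dict.empty = PySem.Dict.counter (fs.map keyOf) := by
    rw [← PySem.Dict.foldl_insert_getD_add_one_eq_counter, List.foldl_map]
    rfl
  rw [h1, PySem.Dict.items_counter]
  have hnd : ((((PySem.Set.ofList (fs.map keyOf)).map (fun k => (k, ((fs.map keyOf).count k : Int)))).map Prod.fst)).Nodup := by
    rw [List.map_map]
    simp only [Function.comp_def, List.map_id']
    exact PySem.Set.nodup_ofList (fs.map keyOf)
  rw [foldl_asm_eq_specL _ hnd]
  apply PySem.Dict.ext
  show List.map (fun d => (d, innerSpecL ((PySem.Set.ofList (fs.map keyOf)).map (fun k => (k, ((fs.map keyOf).count k : Int)))) d))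
        (PySem.Set.ofList (((PySem.Set.ofList (fs.map keyOf)).map (fun k => (k, ((fs.map keyOf).count k : Int)))).map (fun x => x.1.1)))
      = List.map (fun d => (d, innerSpec (fs.map keyOf) d)) (PySem.Set.ofList ((fs.map keyOf).map Prod.fst))
  have hdst : (((PySem.Set.ofList (fs.map keyOf)).map (fun k => (k, ((fs.map keyOf).count k : Int)))).map (fun x => x.1.1))
      = (PySem.Set.ofList (fs.map keyOf)).map Prod.fst := by
    rw [List.map_map]
    rfl
  rw [hdst, ofList_map_ofList]
  exact List.map_congr_left (fun d _ => by rw [innerSpecL_counter_items])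

-- ===== VERDICT (by name: the statement is the Claim_ definition above) =====
theorem aggregate_flight_data_spec : Claim_equal_aggregate_flight_data := by
  intro fs _ _
  unfold Spec_aggregate_flight_data aggregate_flight_data aggregate_flight_data_alt
  rw [foldA_eq_specD]
  show _ = ((List.foldl cntStepB PySem.Dict.empty fs).items.foldl asmStepB PySem.Dict.empty).items.map (fun p => (p.1, p.2.items))
  rw [foldB_eq_specD]
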